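-- pv_equiv track=rewrite | github.com/TomaszWs/Codewars | 7kyu/Cinemas-in-2020.py | maximum_seating
-- ===== SOURCE A (Python) =====
-- def maximum_seating(lst):
--     count = 0
--     for i in range(len(lst)):
--         if lst[i] == 0:
--             left2 = (i - 2 < 0 or lst[i - 2] == 0)
--             left1 = (i - 1 < 0 or lst[i - 1] == 0)
--             right1 = (i + 1 >= len(lst) or lst[i + 1] == 0)
--             right2 = (i + 2 >= len(lst) or lst[i + 2] == 0)
--
--             if left2 and left1 and right1 and right2:
--                 lst[i] = 1
--                 count += 1
--     return count
-- ===== SOURCE B (Python) =====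
-- def maximum_seating(lst):
--     n = len(lst)
--     count = 0
--     i = 0
--     while i < n:
--         if lst[i] != 0:
--             i += 1
--             continue
--         a = i
--         while i < n and lst[i] == 0:
--             i += 1
--         b = i - 1
--         start = a if a == 0 else a + 2
--         end = b if b == n - 1 else b - 2
--         if start <= end:
--             for p in range(start, end + 1, 3):
--                 lst[p] = 1
--             count += (end - start) // 3 + 1
--     return count
-- ===== Notes on version B (the rewrite author's own statement) =====
-- stated objective: alternative
-- what changed: A tests the two left (mutated) and two right neighbours at every index; B decomposes the list into maximal runs of original zeros and, per run, computes the seat positions start, start+3, ... and the seat count in closed form from the run's endpoints and whether they touch the array boundary.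
import Mathlib
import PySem

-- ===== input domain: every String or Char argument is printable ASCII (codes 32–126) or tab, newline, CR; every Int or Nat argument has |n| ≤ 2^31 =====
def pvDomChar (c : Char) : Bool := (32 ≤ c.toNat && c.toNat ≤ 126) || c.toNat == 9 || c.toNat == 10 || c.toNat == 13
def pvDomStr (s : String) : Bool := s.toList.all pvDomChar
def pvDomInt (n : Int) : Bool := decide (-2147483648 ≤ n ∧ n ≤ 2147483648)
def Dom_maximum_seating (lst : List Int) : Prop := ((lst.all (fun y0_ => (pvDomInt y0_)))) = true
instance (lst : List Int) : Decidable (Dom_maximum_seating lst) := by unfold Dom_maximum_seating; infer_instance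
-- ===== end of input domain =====

-- B replaces A's per-position neighbour test by a zero-run decomposition with a closed-form
-- seat count per run (objective: alternative). Both Pythons mutate lst in place identically;
-- the equivalence proved here is about the RETURN value only.

-- ===== PORT A =====
-- A's for-loop over range(len(lst)), mutating lst: index recursion carrying (lst, count).
def aGo (n : Nat) (l : List Int) (count : Int) (i : Nat) : Int :=
  if _h : i < n then
    if l.getD i 0 = 0 then
      if (i < 2 ∨ l.getD (i - 2) 0 = 0) ∧ (i < 1 ∨ l.getD (i - 1) 0 = 0) ∧
         (i + 1 ≥ n ∨ l.getD (i + 1) 0 = 0) ∧ (i + 2 ≥ n ∨ l.getD (i + 2) 0 = 0) then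
        aGo n (l.set i 1) (count + 1) (i + 1)
      else aGo n l count (i + 1)
    else aGo n l count (i + 1)
  else count
termination_by n - i

def maximum_seating (lst : List Int) : Int := aGo lst.length lst 0 0

-- ===== PORT B =====
-- B's outer while-loop: each step consumes one nonzero seat or one whole zero run [a,b].
def altGo (n : Int) (i : Int) : List Int → Int
  | [] => 0
  | x :: xs =>
    if x = 0 then
      let z : Int := 1 + ((xs.takeWhile (fun y => y == 0)).length : Int)
      let rest := xs.dropWhile (fun y => y == 0)
      let a := i
      let b := i + z - 1
      let s := if a = 0 then a else a + 2
      let e := if b = n - 1 then b else b - 2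
      (if s ≤ e then PySem.Int.floordiv (e - s) 3 + 1 else 0) + altGo n (i + z) rest
    else altGo n (i + 1) xs
termination_by l => l.length
decreasing_by
  · simpa using Nat.lt_succ_of_le (List.length_dropWhile_le (fun y => y == 0) xs)
  · simp

def maximum_seating_alt (lst : List Int) : Int := altGo (lst.length : Int) 0 lst

-- ===== PRECONDITION & SPEC =====
def Spec_maximum_seating (lst : List Int) (out : Int) : Prop := out = maximum_seating_alt lst
instance (lst : List Int) (out : Int) : Decidable (Spec_maximum_seating lst out) := by unfold Spec_maximum_seating; infer_instance

-- ===== CLAIM (what is proved, stated in full; the proofs are below) =====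
def Claim_equal_maximum_seating : Prop := ∀ (lst : List Int), Dom_maximum_seating lst → Spec_maximum_seating lst (maximum_seating lst)

-- ===== LEMMAS AND PROOFS =====

-- Common intermediate form: a scan of the remaining suffix carrying d = capped (at 2) length
-- of the zero block immediately to the left in the mutated list (2 at/over the left edge).
def ok2 : List Int → Bool
  | [] => true
  | [y] => y == 0
  | y :: w :: _ => y == 0 && w == 0

def goA (d : Nat) : List Int → Int
  | [] => 0
  | x :: xs =>
    if x = 0 then
      if 2 ≤ d ∧ ok2 xs = true then 1 + goA 0 xs
      else goA (min 2 (d + 1)) xs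
    else goA 0 xs

def ld (l : List Int) (i : Nat) : Nat :=
  if i = 0 then 2
  else if l.getD (i - 1) 0 ≠ 0 then 0
  else if i = 1 then 2
  else if l.getD (i - 2) 0 ≠ 0 then 1
  else 2

theorem drop_getD_cons (l : List Int) (i : Nat) (h : i < l.length) :
    l.drop i = l.getD i 0 :: l.drop (i + 1) := by
  rw [List.getD_eq_getElem l 0 h]
  exact (List.getElem_cons_drop h).symm

theorem ok2_drop (l : List Int) (j : Nat) :
    (ok2 (l.drop j) = true) ↔
      ((j ≥ l.length ∨ l.getD j 0 = 0) ∧ (j + 1 ≥ l.length ∨ l.getD (j + 1) 0 = 0)) := by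
  by_cases h1 : j < l.length
  · rw [drop_getD_cons l j h1]
    by_cases h2 : j + 1 < l.length
    · rw [drop_getD_cons l (j + 1) h2]
      simp only [ok2, Bool.and_eq_true, beq_iff_eq]
      constructor
      · rintro ⟨a, b⟩; exact ⟨Or.inr a, Or.inr b⟩
      · rintro ⟨a, b⟩
        refine ⟨a.resolve_left (by omega), b.resolve_left (by omega)⟩
    · have hnil : l.drop (j + 1) = [] := List.drop_eq_nil_of_le (by omega)
      rw [hnil]
      simp only [ok2, beq_iff_eq]
      constructor
      · intro a; exact ⟨Or.inr a, Or.inl (by omega)⟩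
      · rintro ⟨a, _⟩; exact a.resolve_left (by omega)
  · have hnil : l.drop j = [] := List.drop_eq_nil_of_le (by omega)
    rw [hnil]
    exact iff_of_true rfl ⟨Or.inl (by omega), Or.inl (by omega)⟩

theorem ld_ge2_iff (l : List Int) (i : Nat) :
    2 ≤ ld l i ↔ ((i < 2 ∨ l.getD (i - 2) 0 = 0) ∧ (i < 1 ∨ l.getD (i - 1) 0 = 0)) := by
  unfold ld
  split_ifs with h0 hm1 h1 hm2
  · exact iff_of_true (le_refl 2) ⟨Or.inl (by omega), Or.inl (by omega)⟩
  · exact iff_of_false (by omega)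
      (fun h => hm1 (h.2.resolve_left (by omega)))
  · exact iff_of_true (le_refl 2) ⟨Or.inl (by omega), Or.inr (not_ne_iff.mp hm1)⟩
  · exact iff_of_false (by omega)
      (fun h => hm2 (h.1.resolve_left (by omega)))
  · exact iff_of_true (le_refl 2) ⟨Or.inr (not_ne_iff.mp hm2), Or.inr (not_ne_iff.mp hm1)⟩

theorem ld_succ_zero (l : List Int) (i : Nat) (hz : l.getD i 0 = 0) :
    ld l (i + 1) = min 2 (ld l i + 1) := by
  have e1 : i + 1 - 1 = i := by omega
  have e2 : i + 1 - 2 = i - 1 := by omega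
  unfold ld
  rw [e1, e2, if_neg (show ¬ i + 1 = 0 by omega), if_neg (not_ne_iff.mpr hz)]
  by_cases h0 : i = 0
  · subst h0
    norm_num
  · rw [if_neg (show ¬ i + 1 = 1 by omega), if_neg h0]
    by_cases hm : l.getD (i - 1) 0 ≠ 0
    · rw [if_pos hm, if_pos hm]
      decide
    · rw [if_neg hm, if_neg hm]
      split_ifs <;> decide

theorem ld_succ_nonzero (l : List Int) (i : Nat) (hz : ¬ l.getD i 0 = 0) :
    ld l (i + 1) = 0 := by
  have e1 : i + 1 - 1 = i := by omega
  unfold ld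
  rw [e1, if_neg (show ¬ i + 1 = 0 by omega), if_pos hz]

theorem ld_succ_set (l : List Int) (i : Nat) (h : i < l.length) :
    ld (l.set i 1) (i + 1) = 0 := by
  have e1 : i + 1 - 1 = i := by omega
  have hget : (l.set i 1).getD i 0 = 1 := by
    rw [List.getD_eq_getElem?_getD, List.getElem?_set_self h]
    rfl
  unfold ld
  rw [e1, if_neg (show ¬ i + 1 = 0 by omega), if_pos (show (l.set i 1).getD i 0 ≠ 0 by rw [hget]; norm_num)]

theorem aGo_eq (k : Nat) : ∀ (l : List Int) (c : Int) (i : Nat), l.length - i = k →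
    aGo l.length l c i = c + goA (ld l i) (l.drop i) := by
  induction k with
  | zero =>
    intro l c i hk
    have hge : ¬ i < l.length := by omega
    have hdrop : l.drop i = [] := List.drop_eq_nil_of_le (by omega)
    rw [aGo, dif_neg hge, hdrop, goA]
    ring
  | succ k ih =>
    intro l c i hk
    have hlt : i < l.length := by omega
    have hdrop := drop_getD_cons l i hlt
    rw [aGo, dif_pos hlt, hdrop, goA]
    by_cases hz : l.getD i 0 = 0
    · rw [if_pos hz, if_pos hz]
      have hok := ok2_drop l (i + 1)
      have e12 : i + 1 + 1 = i + 2 := by omega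
      rw [e12] at hok
      by_cases hcond : (i < 2 ∨ l.getD (i - 2) 0 = 0) ∧ (i < 1 ∨ l.getD (i - 1) 0 = 0) ∧
         (i + 1 ≥ l.length ∨ l.getD (i + 1) 0 = 0) ∧ (i + 2 ≥ l.length ∨ l.getD (i + 2) 0 = 0)
      · rw [if_pos hcond,
          if_pos ⟨(ld_ge2_iff l i).mpr ⟨hcond.1, hcond.2.1⟩, hok.mpr ⟨hcond.2.2.1, hcond.2.2.2⟩⟩]
        have hlen : (l.set i 1).length = l.length := List.length_set ..
        have hih := ih (l.set i 1) (c + 1) (i + 1) (by rw [hlen]; omega)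
        rw [hlen] at hih
        rw [hih, ld_succ_set l i hlt]
        have hds : (l.set i 1).drop (i + 1) = l.drop (i + 1) := by
          rw [List.drop_set, if_pos (by omega)]
        rw [hds]
        ring
      · rw [if_neg hcond, if_neg (by
          rintro ⟨h2, hok2⟩
          have hl := (ld_ge2_iff l i).mp h2
          have hr := hok.mp hok2
          exact hcond ⟨hl.1, hl.2, hr.1, hr.2⟩)]
        rw [ih l c (i + 1) (by omega), ld_succ_zero l i hz]
    · rw [if_neg hz, if_neg hz]
      rw [ih l c (i + 1) (by omega), ld_succ_nonzero l i hz]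

-- ---- B side ----

def headNZ : List Int → Prop
  | [] => True
  | x :: _ => x ≠ 0

def runCount (d : Nat) (z : Nat) (E : Bool) : Int :=
  let s : Int := 2 - (d : Int)
  let e : Int := if E then (z : Int) - 1 else (z : Int) - 3
  if s ≤ e then (e - s) / 3 + 1 else 0

theorem goA_headNZ (d : Nat) (l : List Int) (h : headNZ l) : goA d l = goA 0 l := by
  cases l with
  | nil => rfl
  | cons x xs =>
    have hx : ¬ x = 0 := h
    rw [goA, goA, if_neg hx, if_neg hx]

theorem ok2_run (z : Nat) (rest : List Int) (h : headNZ rest) :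
    ok2 (List.replicate z 0 ++ rest) = (decide (2 ≤ z) || rest.isEmpty) := by
  match z, rest with
  | 0, [] => rfl
  | 0, x :: xs =>
    have hx : ¬ x = 0 := h
    cases xs <;> simp [ok2, hx]
  | 1, [] => rfl
  | 1, x :: xs =>
    have hx : ¬ x = 0 := h
    simp [ok2, hx]
  | (n + 2), rest => simp [List.replicate, ok2]

theorem runCount_zero (d : Nat) (E : Bool) (hd : d ≤ 2) : runCount d 0 E = 0 := by
  unfold runCount
  have h : ¬ ((2:Int) - (d : Int) ≤ (if E = true then ((0:Nat) : Int) - 1 else ((0:Nat) : Int) - 3)) := by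
    split_ifs <;> simp <;> omega
  simp only [h, if_false]

theorem goA_run (z : Nat) : ∀ (d : Nat) (rest : List Int), d ≤ 2 → headNZ rest →
    goA d (List.replicate z 0 ++ rest) = runCount d z rest.isEmpty + goA 0 rest := by
  induction z with
  | zero =>
    intro d rest hd h
    rw [List.replicate, List.nil_append, runCount_zero d _ hd, goA_headNZ d rest h]
    ring
  | succ z ih =>
    intro d rest hd h
    rw [List.replicate_succ, List.cons_append, goA, if_pos rfl, ok2_run z rest h]
    by_cases hseat : 2 ≤ d ∧ (2 ≤ z ∨ rest.isEmpty = true)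
    · rw [if_pos ⟨hseat.1, by
        rcases hseat.2 with h2 | h2
        · simp [h2]
        · simp [h2]⟩]
      rw [ih 0 rest (by omega) h]
      have harith : runCount d (z + 1) rest.isEmpty = 1 + runCount 0 z rest.isEmpty := by
        have hd2 : d = 2 := by omega
        subst hd2
        unfold runCount
        cases hrest : rest.isEmpty with
        | true =>
          simp only [if_true]
          push_cast
          split_ifs <;> omega
        | false =>
          have hz2 : 2 ≤ z := by
            rcases hseat.2 with h2 | h2
            · exact h2
            · rw [hrest] at h2; exact absurd h2 (by simp)
          simp only [Bool.false_eq_true, if_false]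
          push_cast
          split_ifs <;> omega
      rw [harith]; ring
    · rw [if_neg (by
        rintro ⟨h2, hok⟩
        apply hseat
        refine ⟨h2, ?_⟩
        rcases Bool.or_eq_true _ _ |>.mp hok with h3 | h3
        · exact Or.inl (by simpa using h3)
        · exact Or.inr h3)]
      rw [ih (min 2 (d + 1)) rest (by omega) h]
      have harith : runCount d (z + 1) rest.isEmpty = runCount (min 2 (d + 1)) z rest.isEmpty := by
        rcases Nat.lt_or_ge d 2 with hd2 | hd2
        · have hmin : min 2 (d + 1) = d + 1 := by omega
          rw [hmin]
          unfold runCount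
          cases rest.isEmpty <;>
            · simp only [Bool.false_eq_true, if_true, if_false]
              push_cast
              split_ifs <;> omega
        · have hd2' : d = 2 := by omega
          subst hd2'
          have hz2 : ¬ 2 ≤ z := by
            intro h2; exact hseat ⟨le_refl 2, Or.inl h2⟩
          have hrest : rest.isEmpty = false := by
            cases hrest : rest.isEmpty with
            | true => exact absurd ⟨le_refl 2, Or.inr hrest⟩ hseat
            | false => rfl
          rw [hrest]
          have hmin : min 2 (2 + 1) = 2 := by omega
          rw [hmin]
          unfold runCount
          simp only [Bool.false_eq_true, if_false]
          push_cast
          split_ifs <;> omega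
      rw [harith]

theorem takeWhile_replicate (xs : List Int) :
    xs.takeWhile (fun y => y == 0) = List.replicate (xs.takeWhile (fun y => y == 0)).length 0 := by
  apply List.eq_replicate_of_mem
  intro b hb
  have := List.mem_takeWhile_imp hb
  simpa using this

theorem headNZ_dropWhile (xs : List Int) : headNZ (xs.dropWhile (fun y => y == 0)) := by
  induction xs with
  | nil => trivial
  | cons x xs ih =>
    rw [List.dropWhile_cons]
    split_ifs with h
    · exact ih
    · simpa [headNZ] using h

theorem front_eq (i n : Int) (z : Nat) (E : Bool) (hi : 0 ≤ i) (hz : 1 ≤ z)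
    (hbn : (i + (z : Int) - 1 = n - 1) ↔ (E = true)) :
    (if (if i = 0 then i else i + 2) ≤
        (if i + (z : Int) - 1 = n - 1 then i + (z : Int) - 1 else i + (z : Int) - 1 - 2)
     then PySem.Int.floordiv
        ((if i + (z : Int) - 1 = n - 1 then i + (z : Int) - 1 else i + (z : Int) - 1 - 2)
          - (if i = 0 then i else i + 2)) 3 + 1
     else 0)
    = runCount (if i = 0 then 2 else 0) z E := by
  rw [PySem.Int.floordiv_eq_ediv_of_pos (by norm_num)]
  unfold runCount
  by_cases hE : E = true
  · rw [if_pos (hbn.mpr hE), hE]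
    simp only [if_true]
    by_cases hi0 : i = 0
    · subst hi0
      push_cast
      split_ifs <;> omega
    · simp only [hi0, if_false]
      push_cast
      split_ifs <;> omega
  · have hb : ¬ (i + (z : Int) - 1 = n - 1) := fun h => hE (hbn.mp h)
    rw [if_neg hb]
    have hEf : E = false := by cases E; rfl; exact absurd rfl hE
    rw [hEf]
    simp only [Bool.false_eq_true, if_false]
    by_cases hi0 : i = 0
    · subst hi0
      push_cast
      split_ifs <;> omega
    · simp only [hi0, if_false]
      push_cast
      split_ifs <;> omega

theorem altGo_eq (k : Nat) : ∀ (l : List Int) (i : Int), l.length ≤ k → 0 ≤ i →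
    altGo (i + l.length) i l = goA (if i = 0 then 2 else 0) l := by
  induction k with
  | zero =>
    intro l i hk _
    have hnil : l = [] := List.eq_nil_of_length_eq_zero (by omega)
    subst hnil
    simp [altGo, goA]
  | succ k ih =>
    intro l i hk hi
    cases l with
    | nil => simp [altGo, goA]
    | cons x xs =>
      by_cases hx : x = 0
      · subst hx
        simp only [altGo]
        set t := xs.takeWhile (fun y => y == 0) with htdef
        set r := xs.dropWhile (fun y => y == 0) with hrdef
        have hxs : xs = t ++ r := (List.takeWhile_append_dropWhile).symm
        have hrep : (0 : Int) :: xs = List.replicate (1 + t.length) 0 ++ r := by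
          conv_lhs => rw [hxs, htdef, takeWhile_replicate xs, ← htdef]
          rw [Nat.add_comm, List.replicate_succ, List.cons_append]
        have hrnz : headNZ r := headNZ_dropWhile xs
        have hlen : ((0 : Int) :: xs).length = 1 + t.length + r.length := by
          rw [hrep, List.length_append, List.length_replicate]
        have hbn : (i + (1 + ((t.length : Int))) - 1 = i + (((0:Int) :: xs).length : Int) - 1)
            ↔ (r.isEmpty = true) := by
          rw [hlen]
          cases r
          · simp
          · simp
            omega
        conv_rhs => rw [hrep, goA_run (1 + t.length) _ r (by split_ifs <;> omega) hrnz]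
        have hzc : (1 : Int) + (t.length : Int) = ((1 + t.length : Nat) : Int) := by push_cast; ring
        rw [hzc] at hbn ⊢
        rw [front_eq i (i + (((0:Int) :: xs).length : Int)) (1 + t.length) r.isEmpty hi (by omega) hbn]
        have hrest : altGo (i + (((0:Int) :: xs).length : Int)) (i + ((1 + t.length : Nat) : Int)) r
            = goA 0 r := by
          have hn : i + (((0:Int) :: xs).length : Int)
              = (i + ((1 + t.length : Nat) : Int)) + (r.length : Int) := by
            rw [hlen]; push_cast; ring
          rw [hn]
          have hklen : r.length ≤ k := by
            have h1 : r.length ≤ xs.length := by rw [hxs]; simp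
            have h2 : xs.length + 1 ≤ k + 1 := by simpa using hk
            omega
          have := ih r (i + ((1 + t.length : Nat) : Int)) hklen (by push_cast; omega)
          rwa [if_neg (by push_cast; omega)] at this
        rw [hrest]
        simp
      · rw [altGo, if_neg hx, goA, if_neg hx]
        have hn : i + (((x :: xs).length : Int)) = (i + 1) + (xs.length : Int) := by
          push_cast [List.length_cons]; ring
        rw [hn]
        have hklen : xs.length ≤ k := by simpa using Nat.lt_succ_iff.mp (by simpa using hk)
        have := ih xs (i + 1) hklen (by omega)
        rwa [if_neg (by omega)] at this

theorem maximum_seating_eq_goA (lst : List Int) : maximum_seating lst = goA 2 lst := by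
  unfold maximum_seating
  rw [aGo_eq (lst.length) lst 0 0 rfl]
  have h1 : ld lst 0 = 2 := rfl
  rw [h1, List.drop_zero]
  ring

theorem maximum_seating_alt_eq_goA (lst : List Int) : maximum_seating_alt lst = goA 2 lst := by
  unfold maximum_seating_alt
  have := altGo_eq lst.length lst 0 (le_refl _) (le_refl _)
  rw [if_pos rfl] at this
  simpa using this

-- ===== VERDICT (by name: the statement is the Claim_ definition above) =====
theorem maximum_seating_spec : Claim_equal_maximum_seating := by
  intro lst _
  unfold Spec_maximum_seating
  rw [maximum_seating_eq_goA, maximum_seating_alt_eq_goA]
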